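-- pv_equiv track=rewrite | github.com/ESFJ-MoZhu/2026SDU | Project3/main.py | external_matrix
-- ===== SOURCE A (Python) =====
-- from typing import List, Optional, Tuple
--
-- P = 21888242871839275222246405745257275088548364400416034343698204186575808495617
--
-- def mod_p(x):
--     """对P取模运算"""
--     return x % P
--
-- def external_matrix(state: List[int]) -> List[int]:
--     """应用外部矩阵乘法(优化版)"""
--     t = len(state)
--     result = [0] * t
--
--     if t == 2:
--         # t=2的优化版本
--         result[0] = mod_p(state[0] + state[1])
--         result[1] = mod_p(state[0] + 2 * state[1])
--     elif t == 3:
--         # t=3的优化版本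
--         total_sum = sum(state) % P
--         result[0] = mod_p(total_sum + 2 * state[0])
--         result[1] = mod_p(total_sum + 2 * state[1])
--         result[2] = mod_p(total_sum + 2 * state[2])
--     elif t == 4:
--         # t=4的优化版本
--         total_sum = sum(state) % P
--         for i in range(t):
--             result[i] = mod_p(total_sum + 3 * state[i])
--     else:
--         # 通用情况 - 可以针对特定t值进一步优化
--         total_sum = sum(state) % P
--         for i in range(t):
--             result[i] = mod_p(total_sum + (t - 1) * state[i])
--
--     return result
-- ===== SOURCE B (Python) =====
-- P = 21888242871839275222246405745257275088548364400416034343698204186575808495617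
--
-- def external_matrix(state):
--     """Build the explicit t x t matrix M = J + (t-1)I and apply it by a
--     plain matrix-vector product mod P."""
--     t = len(state)
--     M = [[(t if i == j else 1) for j in range(t)] for i in range(t)]
--     out = []
--     for row in M:
--         acc = 0
--         for m, s in zip(row, state):
--             acc += m * s
--         out.append(acc % P)
--     return out
-- ===== Notes on version B (the rewrite author's own statement) =====
-- stated objective: alternative
-- what changed: B constructs the explicit t x t external matrix M = J + (t-1)I as data and applies it by a plain O(t^2) matrix-vector product mod P, instead of A's branch-per-t closed-form O(t) summation.
-- intended difference: On inputs of length 2, A returns [(s0+s1)%P, (s0+2*s1)%P] (its special t=2 branch drops an s0), while B returns [(2*s0+s1)%P, (s0+2*s1)%P], which matches A's own general formula sum+(t-1)*state[i] at t=2 and the standard symmetric circ(2,1) external matrix, so B's value is the intended one. — e.g. on external_matrix([1, 2]): A returns [3, 5], B returns [4, 5]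
import Mathlib
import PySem

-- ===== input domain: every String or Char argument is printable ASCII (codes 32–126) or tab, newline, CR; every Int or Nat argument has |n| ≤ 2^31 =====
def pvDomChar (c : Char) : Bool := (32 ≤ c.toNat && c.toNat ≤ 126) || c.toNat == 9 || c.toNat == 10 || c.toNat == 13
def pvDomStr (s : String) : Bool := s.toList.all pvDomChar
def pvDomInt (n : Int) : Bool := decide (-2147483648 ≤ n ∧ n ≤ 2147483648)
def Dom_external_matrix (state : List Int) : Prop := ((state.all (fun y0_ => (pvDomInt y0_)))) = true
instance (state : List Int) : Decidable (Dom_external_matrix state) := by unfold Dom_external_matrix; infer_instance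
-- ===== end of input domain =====

-- B replaces A's per-t closed-form branches by building the explicit t×t matrix M = J + (t-1)·I
-- and applying it with a plain matrix–vector product mod P (objective: alternative algorithm).

-- ===== PORT A =====
def pvP : Int := 21888242871839275222246405745257275088548364400416034343698204186575808495617

def mod_p (x : Int) : Int := PySem.Int.mod x pvP

def external_matrix (state : List Int) : List Int :=
  let t : Int := state.length
  if t = 2 then
    [mod_p (PySem.List.pyGetD state 0 0 + PySem.List.pyGetD state 1 0),
     mod_p (PySem.List.pyGetD state 0 0 + 2 * PySem.List.pyGetD state 1 0)]
  else if t = 3 then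
    let total_sum := PySem.Int.mod state.sum pvP
    [mod_p (total_sum + 2 * PySem.List.pyGetD state 0 0),
     mod_p (total_sum + 2 * PySem.List.pyGetD state 1 0),
     mod_p (total_sum + 2 * PySem.List.pyGetD state 2 0)]
  else if t = 4 then
    let total_sum := PySem.Int.mod state.sum pvP
    (PySem.List.pyRange 0 t 1).map (fun i => mod_p (total_sum + 3 * PySem.List.pyGetD state i 0))
  else
    let total_sum := PySem.Int.mod state.sum pvP
    (PySem.List.pyRange 0 t 1).map (fun i => mod_p (total_sum + (t - 1) * PySem.List.pyGetD state i 0))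

-- ===== PORT B =====
def external_matrix_alt (state : List Int) : List Int :=
  let t := state.length
  let M : List (List Int) :=
    (List.range t).map (fun i => (List.range t).map (fun j => if i = j then (t : Int) else 1))
  M.map (fun row => PySem.Int.mod ((row.zip state).foldl (fun acc p => acc + p.1 * p.2) 0) pvP)

-- ===== PRECONDITION & SPEC =====
-- On inputs of length 2, A returns [(s0+s1)%P, (s0+2*s1)%P] (its special t=2 branch drops an s0),
-- while B returns [(2*s0+s1)%P, (s0+2*s1)%P], which matches A's own general formula
-- sum+(t-1)*state[i] at t=2 (the symmetric circ(2,1) matrix), so B's value is the intended one.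
def D_external_matrix (state : List Int) : Prop := state.length = 2
instance (state : List Int) : Decidable (D_external_matrix state) := by unfold D_external_matrix; infer_instance

def Spec_external_matrix (state : List Int) (out : List Int) : Prop :=
  ¬ D_external_matrix state → out = external_matrix_alt state
instance (state : List Int) (out : List Int) : Decidable (Spec_external_matrix state out) := by unfold Spec_external_matrix; infer_instance

def pvDiffWitness_external_matrix : List Int := [1, 2]
def pvDiffWitnessOut_external_matrix : (List Int) × (List Int) := ([3, 5], [4, 5])

-- ===== CLAIM (what is proved, stated in full; the proofs are below) =====
def Claim_unchanged_external_matrix : Prop := ∀ (state : List Int), Dom_external_matrix state → Spec_external_matrix state (external_matrix state)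
def Claim_changed_external_matrix : Prop := Dom_external_matrix (pvDiffWitness_external_matrix) ∧ D_external_matrix (pvDiffWitness_external_matrix) ∧ external_matrix (pvDiffWitness_external_matrix) = pvDiffWitnessOut_external_matrix.1 ∧ external_matrix_alt (pvDiffWitness_external_matrix) = pvDiffWitnessOut_external_matrix.2 ∧ pvDiffWitnessOut_external_matrix.1 ≠ pvDiffWitnessOut_external_matrix.2

-- ===== LEMMAS AND PROOFS =====

-- common normal form: result[i] = (sum + (t-1)*state[i]) % P
def pvG (state : List Int) : List Int :=
  (List.range state.length).map
    (fun i => PySem.Int.mod (state.sum + ((state.length : Int) - 1) * state.getD i 0) pvP)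

theorem pv_mod_shift (a b : Int) :
    PySem.Int.mod (PySem.Int.mod a pvP + b) pvP = PySem.Int.mod (a + b) pvP := by
  simp only [PySem.Int.mod_eq_emod_of_pos (show (0:Int) < pvP by norm_num [pvP])]
  exact Int.emod_add_emod a pvP b

theorem pv_dot_foldl (r s : List Int) (a : Int) :
    (r.zip s).foldl (fun acc p => acc + p.1 * p.2) a = a + (List.zipWith (· * ·) r s).sum := by
  induction r generalizing s a with
  | nil => simp
  | cons x xs ih =>
    cases s with
    | nil => simp
    | cons y ys => simp [ih, add_assoc]

theorem pv_row_ones (s : List Int) :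
    (List.zipWith (· * ·) ((List.range s.length).map (fun _ => (1 : Int))) s).sum = s.sum := by
  induction s with
  | nil => simp
  | cons x xs ih =>
    rw [List.length_cons, List.range_succ_eq_map, List.map_cons, List.map_map]
    have hfn : ((fun _ : Nat => (1 : Int)) ∘ Nat.succ) = (fun _ : Nat => (1 : Int)) := rfl
    rw [hfn, List.zipWith_cons_cons, List.sum_cons, ih, one_mul, List.sum_cons]

theorem pv_row_dot (c : Int) (s : List Int) (i : Nat) (hi : i < s.length) :
    (List.zipWith (· * ·) ((List.range s.length).map (fun j => if i = j then c else 1)) s).sum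
      = s.sum + (c - 1) * s.getD i 0 := by
  induction s generalizing i with
  | nil => simp at hi
  | cons x xs ih =>
    rw [List.length_cons, List.range_succ_eq_map, List.map_cons, List.map_map]
    cases i with
    | zero =>
      have hfn : ((fun j => if 0 = j then c else 1) ∘ Nat.succ) = (fun _ : Nat => (1 : Int)) := by
        funext j; simp
      simp only [hfn, List.zipWith_cons_cons, List.sum_cons]
      rw [pv_row_ones xs]
      simp; ring
    | succ i' =>
      have hfn : ((fun j => if i' + 1 = j then c else 1) ∘ Nat.succ)
          = (fun j : Nat => if i' = j then c else 1) := by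
        funext j; by_cases h : i' = j <;> simp [h]
      have hi' : i' < xs.length := by simpa using hi
      simp only [hfn, List.zipWith_cons_cons, List.sum_cons]
      rw [ih i' hi']
      simp; ring

theorem pv_alt_eq_g (state : List Int) : external_matrix_alt state = pvG state := by
  unfold external_matrix_alt pvG
  rw [List.map_map]
  apply List.map_congr_left
  intro i hi
  have hilt : i < state.length := List.mem_range.mp hi
  simp only [Function.comp]
  rw [pv_dot_foldl, zero_add, pv_row_dot (state.length : Int) state i hilt]

theorem pv_a_eq_g (state : List Int) (h2 : state.length ≠ 2) :
    external_matrix state = pvG state := by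
  unfold external_matrix pvG
  have h2' : (state.length : Int) ≠ 2 := by exact_mod_cast h2
  rw [if_neg h2']
  by_cases h3 : (state.length : Int) = 3
  · -- t = 3 branch
    have hl : state.length = 3 := by exact_mod_cast h3
    obtain ⟨a, b, c, rfl⟩ := List.length_eq_three.mp hl
    rw [if_pos h3]
    simp only [List.length_cons, List.length_nil, List.range_succ, List.range_zero,
      List.nil_append, List.cons_append, List.map_cons, List.map_nil,
      PySem.List.pyGetD_ofNat', mod_p]
    norm_num [pv_mod_shift, List.getD]
  · rw [if_neg h3]
    have hrange := PySem.List.pyRange_zero_natCast state.length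
    by_cases h4 : (state.length : Int) = 4
    · -- t = 4 branch: (t-1) = 3
      rw [if_pos h4, hrange, List.map_map]
      apply List.map_congr_left
      intro i _
      simp only [Function.comp, PySem.List.pyGetD_natCast, mod_p]
      rw [pv_mod_shift, h4]; norm_num
    · rw [if_neg h4, hrange, List.map_map]
      apply List.map_congr_left
      intro i _
      simp only [Function.comp, PySem.List.pyGetD_natCast, mod_p]
      rw [pv_mod_shift]

-- ===== VERDICT (by name: the statement is the Claim_ definition above) =====
theorem external_matrix_spec : Claim_unchanged_external_matrix := by
  intro state _ hD
  rw [pv_a_eq_g state hD, pv_alt_eq_g state]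

theorem external_matrix_changed : Claim_changed_external_matrix := by
  unfold Claim_changed_external_matrix; decide
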